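-- pv_equiv track=rewrite | github.com/fonttools/fonttools | Lib/fontTools/cffLib/opSpecializer.py | vhcurveto
-- ===== SOURCE A (Python) =====
-- def _everyN(el, n):
-- 	"""Group the list el into groups of size n"""
-- 	if len(el) % n != 0: raise ValueError(args)
-- 	for i in range(0, len(el), n):
-- 		yield el[i:i+n]
--
-- def vhcurveto(args):
-- 	if len(args) < 4 or len(args) % 8 not in (0,1,4,5): raise ValueError(args)
-- 	last_args = None
-- 	if len(args) % 2 == 1:
-- 		lastStraight = len(args) % 8 == 5
-- 		args, last_args = args[:-5], args[-5:]
-- 	it = _everyN(args, 4)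
-- 	try:
-- 		while True:
-- 			args = next(it)
-- 			yield ('rrcurveto', [0, args[0], args[1], args[2], args[3], 0])
-- 			args = next(it)
-- 			yield ('rrcurveto', [args[0], 0, args[1], args[2], 0, args[3]])
-- 	except StopIteration:
-- 		pass
-- 	if last_args:
-- 		args = last_args
-- 		if lastStraight:
-- 			yield ('rrcurveto', [0, args[0], args[1], args[2], args[3], args[4]])
-- 		else:
-- 			yield ('rrcurveto', [args[0], 0, args[1], args[2], args[4], args[3]])
-- ===== SOURCE B (Python) =====
-- def vhcurveto(args):
-- 	if len(args) < 4 or len(args) % 8 not in (0,1,4,5): raise ValueError(args)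
-- 	# Stage 1: build every curve as the uniform "vertical" template, including the
-- 	# 5-argument tail (whose extra value simply replaces the trailing 0).
-- 	if len(args) % 2 == 1:
-- 		body, tail = args[:-5], args[-5:]
-- 	else:
-- 		body, tail = args, None
-- 	curves = [[0, body[i], body[i+1], body[i+2], body[i+3], 0]
-- 	          for i in range(0, len(body), 4)]
-- 	if tail is not None:
-- 		curves.append([0, tail[0], tail[1], tail[2], tail[3], tail[4]])
-- 	# Stage 2: every odd-indexed curve is the horizontal variant, obtained by
-- 	# swapping the first and last coordinate pairs of the vertical template.
-- 	for i, c in enumerate(curves):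
-- 		if i % 2 == 1:
-- 			c = [c[1], c[0], c[2], c[3], c[5], c[4]]
-- 		yield ('rrcurveto', c)
-- ===== Notes on version B (the rewrite author's own statement) =====
-- stated objective: alternative
-- what changed: Replaces A's exception-driven two-next-per-iteration pairing with two staged passes: first build every curve (body chunks AND the 5-argument tail) as one uniform vertical template, then transform every odd-indexed curve by swapping its first and last coordinate pairs, so the lastStraight branch disappears entirely and the tail is handled by the same parity rule.
import Mathlib
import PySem

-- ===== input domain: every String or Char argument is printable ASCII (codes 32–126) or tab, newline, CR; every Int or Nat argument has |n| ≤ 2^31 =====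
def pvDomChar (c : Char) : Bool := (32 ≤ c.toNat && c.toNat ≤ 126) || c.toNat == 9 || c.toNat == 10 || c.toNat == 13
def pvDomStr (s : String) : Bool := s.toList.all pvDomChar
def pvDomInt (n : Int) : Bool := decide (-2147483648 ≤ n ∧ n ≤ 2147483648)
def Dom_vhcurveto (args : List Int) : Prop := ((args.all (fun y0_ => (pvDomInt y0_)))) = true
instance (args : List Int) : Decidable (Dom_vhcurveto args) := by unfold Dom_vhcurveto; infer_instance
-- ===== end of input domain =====

-- ===== PORT A =====
-- B builds every curve (body chunks and the 5-argument tail) as one uniform vertical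
-- template and then swaps the first/last coordinate pairs of every odd-indexed curve,
-- so A's pairing loop and its lastStraight branch disappear; objective: alternative.
-- A is a Python generator; equivalence is about the list of yielded values.

-- the 'while True: next; yield even; next; yield odd' pairing loop of A
def vhA_pairs : List Int → List (String × List Int)
  | a0 :: a1 :: a2 :: a3 :: rest =>
      ("rrcurveto", [0, a0, a1, a2, a3, 0]) ::
        (match rest with
          | b0 :: b1 :: b2 :: b3 :: rest2 =>
              ("rrcurveto", [b0, 0, b1, b2, 0, b3]) :: vhA_pairs rest2
          | _ => [])
  | _ => []

def vhcurveto (args : List Int) : List (String × List Int) :=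
  if args.length < 4 ∨ ¬(args.length % 8 = 0 ∨ args.length % 8 = 1 ∨
      args.length % 8 = 4 ∨ args.length % 8 = 5) then
    []  -- Python raises ValueError here (excluded by Pre_)
  else
    let st :=
      if args.length % 2 = 1 then
        (PySem.List.slice args none (some (-5)),
         some (PySem.List.slice args (some (-5)) none),
         decide (args.length % 8 = 5))
      else (args, none, false)
    vhA_pairs st.1 ++
      (match st.2.1 with
        | none => []
        | some last =>
          if last = [] then []  -- 'if last_args:' falsy for []
          else
            match last with
            | a0 :: a1 :: a2 :: a3 :: a4 :: _ =>
                if st.2.2 then [("rrcurveto", [0, a0, a1, a2, a3, a4])]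
                else [("rrcurveto", [a0, 0, a1, a2, a4, a3])]
            | _ => [])  -- Python IndexError (unreachable under Pre_)

-- ===== PORT B =====
def vhcurveto_alt (args : List Int) : List (String × List Int) :=
  if args.length < 4 ∨ ¬(args.length % 8 = 0 ∨ args.length % 8 = 1 ∨
      args.length % 8 = 4 ∨ args.length % 8 = 5) then
    []  -- Python raises ValueError here (excluded by Pre_)
  else
    -- body, tail = (args[:-5], args[-5:]) or (args, None)
    let bt : List Int × Option (List Int) :=
      if args.length % 2 = 1 then
        (PySem.List.slice args none (some (-5)),
         some (PySem.List.slice args (some (-5)) none))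
      else (args, none)
    let body := bt.1
    -- stage 1: one uniform vertical template per 4-chunk, plus the tail template
    let curves : List (List Int) :=
      (PySem.List.pyRange 0 (body.length : Int) 4).map (fun i =>
        [0, PySem.List.pyGetD body i 0, PySem.List.pyGetD body (i + 1) 0,
         PySem.List.pyGetD body (i + 2) 0, PySem.List.pyGetD body (i + 3) 0, 0]) ++
      (match bt.2 with
        | none => []
        | some t =>
            [[0, PySem.List.pyGetD t 0 0, PySem.List.pyGetD t 1 0,
              PySem.List.pyGetD t 2 0, PySem.List.pyGetD t 3 0,
              PySem.List.pyGetD t 4 0]])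
    -- stage 2: swap first/last coordinate pairs of every odd-indexed curve
    (PySem.List.enumerate curves 0).map (fun ic =>
      ("rrcurveto",
        if PySem.Int.mod ic.1 2 = 1 then
          [PySem.List.pyGetD ic.2 1 0, PySem.List.pyGetD ic.2 0 0,
           PySem.List.pyGetD ic.2 2 0, PySem.List.pyGetD ic.2 3 0,
           PySem.List.pyGetD ic.2 5 0, PySem.List.pyGetD ic.2 4 0]
        else ic.2))

-- ===== PRECONDITION & SPEC =====
-- Pre_ is exactly A's opening guard: outside it A raises ValueError.
def Pre_vhcurveto (args : List Int) : Prop :=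
  4 ≤ args.length ∧ (args.length % 8 = 0 ∨ args.length % 8 = 1 ∨
    args.length % 8 = 4 ∨ args.length % 8 = 5)
instance (args : List Int) : Decidable (Pre_vhcurveto args) := by
  unfold Pre_vhcurveto; infer_instance
def pvWitness_vhcurveto : List Int := [1, 2, 3, 4]

def Spec_vhcurveto (args : List Int) (out : List (String × List Int)) : Prop := out = vhcurveto_alt args
instance (args : List Int) (out : List (String × List Int)) : Decidable (Spec_vhcurveto args out) := by unfold Spec_vhcurveto; infer_instance

-- ===== CLAIM (what is proved, stated in full; the proofs are below) =====
def Claim_equal_vhcurveto : Prop := ∀ (args : List Int), Dom_vhcurveto args → Pre_vhcurveto args → Spec_vhcurveto args (vhcurveto args)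

-- ===== LEMMAS AND PROOFS =====

-- cons-based toggle loop characterising the final output on the body
def vhToggle (horiz : Bool) : List Int → List (String × List Int)
  | a0 :: a1 :: a2 :: a3 :: rest =>
      ("rrcurveto",
        if horiz then [a0, 0, a1, a2, 0, a3] else [0, a0, a1, a2, a3, 0]) ::
        vhToggle (!horiz) rest
  | _ => []

theorem vhA_pairs_eq_toggle : ∀ l : List Int, vhA_pairs l = vhToggle false l
  | a0 :: a1 :: a2 :: a3 :: b0 :: b1 :: b2 :: b3 :: rest2 => by
      simp [vhA_pairs, vhToggle, vhA_pairs_eq_toggle rest2]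
  | [] | [_] | [_, _] | [_, _, _] => by simp [vhA_pairs, vhToggle]
  | [_, _, _, _] => by simp [vhA_pairs, vhToggle]
  | [_, _, _, _, _] => by simp [vhA_pairs, vhToggle]
  | [_, _, _, _, _, _] => by simp [vhA_pairs, vhToggle]
  | [_, _, _, _, _, _, _] => by simp [vhA_pairs, vhToggle]

-- B's stage 1 on the body, as a structural recursion (proved equal to the comprehension)
def mkCurves : List Int → List (List Int)
  | a0 :: a1 :: a2 :: a3 :: rest => [0, a0, a1, a2, a3, 0] :: mkCurves rest
  | _ => []

-- B's stage 2, as a structural recursion with a parity flag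
def swapPass (p : Bool) : List (List Int) → List (String × List Int)
  | [] => []
  | c :: cs =>
      ("rrcurveto",
        if p then
          [PySem.List.pyGetD c 1 0, PySem.List.pyGetD c 0 0,
           PySem.List.pyGetD c 2 0, PySem.List.pyGetD c 3 0,
           PySem.List.pyGetD c 5 0, PySem.List.pyGetD c 4 0]
        else c) :: swapPass (!p) cs

theorem pyRange4_nil (a : Int) : PySem.List.pyRange a a 4 = [] := by
  rw [PySem.List.pyRange_of_pos _ _ (by norm_num)]; simp

theorem pyRange4_cons (a : Int) (k : Nat) :
    PySem.List.pyRange a (a + 4 * ((k : Int) + 1)) 4 =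
      a :: PySem.List.pyRange (a + 4) (a + 4 * ((k : Int) + 1)) 4 := by
  rw [PySem.List.pyRange_of_pos _ _ (by norm_num),
      PySem.List.pyRange_of_pos _ _ (by norm_num)]
  have hc1 : (if a < a + 4 * ((k : Int) + 1) then
      ((a + 4 * ((k : Int) + 1) - a + 4 - 1) / 4).toNat else 0) = k + 1 := by
    rw [if_pos (by omega)]; omega
  have hc2 : (if a + 4 < a + 4 * ((k : Int) + 1) then
      ((a + 4 * ((k : Int) + 1) - (a + 4) + 4 - 1) / 4).toNat else 0) = k := by
    split_ifs <;> omega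
  rw [hc1, hc2, List.range_succ_eq_map, List.map_cons, List.map_map]
  refine congrArg₂ _ (by ring) (List.map_congr_left ?_)
  intro t _
  simp only [Function.comp_apply]
  push_cast
  ring

-- the comprehension over range(0, len(body), 4) builds exactly mkCurves body
theorem curves_eq (body : List Int) : ∀ (k j : Nat),
    j + 4 * k ≤ body.length →
    (PySem.List.pyRange (j : Int) ((j : Int) + 4 * (k : Int)) 4).map (fun i =>
        [0, PySem.List.pyGetD body i 0, PySem.List.pyGetD body (i + 1) 0,
         PySem.List.pyGetD body (i + 2) 0, PySem.List.pyGetD body (i + 3) 0, 0]) =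
      mkCurves ((body.drop j).take (4 * k)) := by
  intro k
  induction k with
  | zero =>
      intro j _
      simp [pyRange4_nil, mkCurves]
  | succ k ih =>
      intro j hle
      have hj0 : j < body.length := by omega
      have hj1 : j + 1 < body.length := by omega
      have hj2 : j + 2 < body.length := by omega
      have hj3 : j + 3 < body.length := by omega
      rw [show ((j : Int) + 4 * ((k + 1 : Nat) : Int)) = (j : Int) + 4 * ((k : Int) + 1) by
            push_cast; ring,
          pyRange4_cons, List.map_cons]
      have g0 : PySem.List.pyGetD body (j : Int) 0 = body[j] := by
        rw [PySem.List.pyGetD_eq_getElem body 0 (by omega) (by exact_mod_cast hj0)]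
        congr 1
      have g1 : PySem.List.pyGetD body ((j : Int) + 1) 0 = body[j + 1] := by
        rw [PySem.List.pyGetD_eq_getElem body 0 (by omega) (by exact_mod_cast hj1)]
        congr 1
      have g2 : PySem.List.pyGetD body ((j : Int) + 2) 0 = body[j + 2] := by
        rw [PySem.List.pyGetD_eq_getElem body 0 (by omega) (by exact_mod_cast hj2)]
        congr 1
      have g3 : PySem.List.pyGetD body ((j : Int) + 3) 0 = body[j + 3] := by
        rw [PySem.List.pyGetD_eq_getElem body 0 (by omega) (by exact_mod_cast hj3)]
        congr 1
      rw [g0, g1, g2, g3]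
      have hdrop : (body.drop j).take (4 * (k + 1)) =
          body[j] :: body[j + 1] :: body[j + 2] :: body[j + 3] ::
            ((body.drop (j + 4)).take (4 * k)) := by
        rw [List.drop_eq_getElem_cons hj0, show 4 * (k + 1) = (4 * k + 3) + 1 by ring,
            List.take_succ_cons,
            List.drop_eq_getElem_cons hj1, show 4 * k + 3 = (4 * k + 2) + 1 by ring,
            List.take_succ_cons,
            List.drop_eq_getElem_cons hj2, show 4 * k + 2 = (4 * k + 1) + 1 by ring,
            List.take_succ_cons,
            List.drop_eq_getElem_cons hj3, List.take_succ_cons]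
      rw [hdrop, mkCurves]
      have hrng : PySem.List.pyRange ((j : Int) + 4) ((j : Int) + 4 * ((k : Int) + 1)) 4 =
          PySem.List.pyRange (((j + 4 : Nat) : Int))
            (((j + 4 : Nat) : Int) + 4 * (k : Int)) 4 := by
        congr 1 <;> push_cast <;> ring
      rw [hrng, ih (j + 4) (by omega)]

-- the enumerate/parity map is swapPass (parity of the start index)
theorem enum_map_eq_swapPass : ∀ (cs : List (List Int)) (s : Nat),
    (PySem.List.enumerate cs (s : Int)).map (fun ic =>
      (("rrcurveto" : String),
        if PySem.Int.mod ic.1 2 = 1 then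
          [PySem.List.pyGetD ic.2 1 0, PySem.List.pyGetD ic.2 0 0,
           PySem.List.pyGetD ic.2 2 0, PySem.List.pyGetD ic.2 3 0,
           PySem.List.pyGetD ic.2 5 0, PySem.List.pyGetD ic.2 4 0]
        else ic.2)) = swapPass (decide (s % 2 = 1)) cs
  | [], s => by simp [PySem.List.enumerate_nil, swapPass]
  | c :: cs, s => by
      have hmod : PySem.Int.mod (s : Int) 2 = ((s % 2 : Nat) : Int) := by
        rw [PySem.Int.mod_eq_emod_of_pos (by norm_num : (0 : Int) < 2)]
        omega
      rw [PySem.List.enumerate_cons, List.map_cons, swapPass]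
      have hfst : (((s : Int), c)).1 = (s : Int) := rfl
      congr 1
      · rw [hfst]
        by_cases hp : s % 2 = 1
        · rw [if_pos (by rw [hmod, hp]; norm_num),
              if_pos (by simp [hp])]
        · have h0 : s % 2 = 0 := by omega
          rw [if_neg (by rw [hmod, h0]; norm_num), if_neg (by simp [hp])]
      · rw [show (s : Int) + 1 = ((s + 1 : Nat) : Int) by push_cast; ring,
            enum_map_eq_swapPass cs (s + 1)]
        have hflip : decide ((s + 1) % 2 = 1) = !decide (s % 2 = 1) := by
          by_cases hp : s % 2 = 1
          · have h0 : (s + 1) % 2 = 0 := by omega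
            simp [h0, hp]
          · have h1 : (s + 1) % 2 = 1 := by omega
            simp [h1, hp]
        rw [hflip]

-- the start index of B's enumerate is the literal 0
theorem enum_map_eq_swapPass0 (cs : List (List Int)) :
    (PySem.List.enumerate cs 0).map (fun ic =>
      (("rrcurveto" : String),
        if PySem.Int.mod ic.1 2 = 1 then
          [PySem.List.pyGetD ic.2 1 0, PySem.List.pyGetD ic.2 0 0,
           PySem.List.pyGetD ic.2 2 0, PySem.List.pyGetD ic.2 3 0,
           PySem.List.pyGetD ic.2 5 0, PySem.List.pyGetD ic.2 4 0]
        else ic.2)) = swapPass false cs := by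
  have h := enum_map_eq_swapPass cs 0
  simpa using h

-- swapping the vertical template gives the horizontal one: stage2 ∘ stage1 = toggle
theorem swapPass_mkCurves : ∀ (l : List Int) (p : Bool),
    swapPass p (mkCurves l) = vhToggle p l
  | a0 :: a1 :: a2 :: a3 :: rest, p => by
      rw [mkCurves, swapPass, vhToggle, swapPass_mkCurves rest (!p)]
      by_cases hp : p <;>
        simp [hp, PySem.List.pyGetD, PySem.List.pyGet?, PySem.List.pyIdx?]
  | [], _ => by simp [mkCurves, vhToggle, swapPass]
  | [_], _ => by simp [mkCurves, vhToggle, swapPass]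
  | [_, _], _ => by simp [mkCurves, vhToggle, swapPass]
  | [_, _, _], _ => by simp [mkCurves, vhToggle, swapPass]

theorem mkCurves_length : ∀ (l : List Int), (mkCurves l).length = l.length / 4
  | a0 :: a1 :: a2 :: a3 :: rest => by
      rw [mkCurves, List.length_cons, mkCurves_length rest]
      simp [List.length_cons]
      omega
  | [] => by simp [mkCurves]
  | [_] => by simp [mkCurves]
  | [_, _] => by simp [mkCurves]
  | [_, _, _] => by simp [mkCurves]

theorem swapPass_append (xs ys : List (List Int)) (p : Bool) :
    swapPass p (xs ++ ys) =
      swapPass p xs ++ swapPass (xor (decide (xs.length % 2 = 1)) p) ys := by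
  induction xs generalizing p with
  | nil => simp [swapPass]
  | cons c cs ih =>
      rw [List.cons_append, swapPass, swapPass, ih (!p), List.cons_append]
      congr 3
      rcases p with _ | _ <;> by_cases h : cs.length % 2 = 1 <;>
        · have : (cs.length + 1) % 2 = (if cs.length % 2 = 1 then 0 else 1) := by
            split_ifs <;> omega
          simp [List.length_cons, this, h]

-- odd case: args[-5:] has exactly five elements
theorem last_shape (args : List Int) (h5 : 5 ≤ args.length) :
    ∃ a0 a1 a2 a3 a4, PySem.List.slice args (some (-5)) none =
      [a0, a1, a2, a3, a4] := by
  have hl : (PySem.List.slice args (some (-5)) none).length = 5 := by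
    rw [PySem.List.slice_from_neg_ofNat args 5 (by norm_num), List.length_drop]
    omega
  rcases hll : PySem.List.slice args (some (-5)) none with
    _ | ⟨a, _ | ⟨b, _ | ⟨c, _ | ⟨d, _ | ⟨e, _ | ⟨f, t⟩⟩⟩⟩⟩⟩ <;>
    rw [hll] at hl <;> simp_all

-- ===== VERDICT (by name: the statement is the Claim_ definition above) =====
theorem vhcurveto_spec : Claim_equal_vhcurveto := by
  intro args _hdom hpre
  obtain ⟨hlen, hmod⟩ := hpre
  unfold Spec_vhcurveto vhcurveto vhcurveto_alt
  split
  · rfl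
  · by_cases hodd : args.length % 2 = 1 <;>
      simp only [hodd, if_true, if_false]
    · -- odd length
      have h5 : 5 ≤ args.length := by omega
      obtain ⟨k, hk⟩ : ∃ k, args.length - 5 = 4 * k := ⟨(args.length - 5) / 4, by omega⟩
      obtain ⟨a0, a1, a2, a3, a4, hlast⟩ := last_shape args h5
      have hblen : (PySem.List.slice args none (some (-5))).length = 4 * k := by
        rw [PySem.List.slice_to_neg_ofNat args 5 (by norm_num), List.length_take]
        omega
      have hcur := curves_eq (PySem.List.slice args none (some (-5))) k 0 (by omega)
      simp only [Nat.cast_zero, List.drop_zero] at hcur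
      rw [hlast, vhA_pairs_eq_toggle, hblen,
          show ((4 * k : Nat) : Int) = (0 : Int) + 4 * (k : Int) by push_cast; ring,
          hcur,
          show List.take (4 * k) (PySem.List.slice args none (some (-5))) =
              PySem.List.slice args none (some (-5)) by
            rw [← hblen, List.take_length],
          enum_map_eq_swapPass0, swapPass_append, swapPass_mkCurves]
      have hklen : (mkCurves (PySem.List.slice args none (some (-5)))).length = k := by
        rw [mkCurves_length, hblen]; omega
      rw [hklen]
      by_cases h85 : args.length % 8 = 5
      · have hke : k % 2 = 0 := by omega
        simp [h85, hke, swapPass, PySem.List.pyGetD, PySem.List.pyGet?, PySem.List.pyIdx?]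
      · have hko : k % 2 = 1 := by omega
        have h81 : args.length % 8 ≠ 5 := h85
        simp [h81, hko, swapPass, PySem.List.pyGetD, PySem.List.pyGet?, PySem.List.pyIdx?]
    · -- even length
      obtain ⟨k, hk⟩ : ∃ k, args.length = 4 * k := ⟨args.length / 4, by omega⟩
      have hcur := curves_eq args k 0 (by omega)
      simp only [Nat.cast_zero, List.drop_zero] at hcur
      rw [vhA_pairs_eq_toggle, hk,
          show ((4 * k : Nat) : Int) = (0 : Int) + 4 * (k : Int) by push_cast; ring,
          hcur, ← hk, List.take_length, List.append_nil,
          enum_map_eq_swapPass0, List.append_nil, swapPass_mkCurves]
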